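-- pv_equiv track=rewrite | github.com/andrewleech/mpy-coverage | src/mpy_coverage/report.py | _apply_path_map
-- ===== SOURCE A (Python) =====
-- def _apply_path_map(filenames, path_maps):
--     """Remap device paths to host paths.
--
--     Returns dict {original_filename: resolved_host_path}.
--     """
--     source_paths = {}
--     for filename in filenames:
--         resolved = filename
--         for mapping in path_maps:
--             if "=" not in mapping:
--                 continue
--             device_prefix, host_prefix = mapping.split("=", 1)
--             if filename.startswith(device_prefix):
--                 resolved = host_prefix + filename[len(device_prefix):]
--                 break
--         source_paths[filename] = resolved
--     return source_paths
-- ===== SOURCE B (Python) =====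
-- def _apply_path_map(filenames, path_maps):
--     """Remap device paths to host paths.
--
--     Returns dict {original_filename: resolved_host_path}.
--     """
--     source_paths = {filename: filename for filename in filenames}
--     unresolved = set(filenames)
--     for mapping in path_maps:
--         if "=" not in mapping:
--             continue
--         device_prefix, host_prefix = mapping.split("=", 1)
--         matched = [fn for fn in unresolved if fn.startswith(device_prefix)]
--         for fn in matched:
--             source_paths[fn] = host_prefix + fn[len(device_prefix):]
--         unresolved.difference_update(matched)
--     return source_paths
-- ===== Notes on version B (the rewrite author's own statement) =====
-- stated objective: faster
-- what changed: Loop nesting is inverted: B seeds the result dict with identity entries and a set of unresolved filenames, then makes one pass over path_maps, splitting each mapping once and resolving (and removing) every still-unresolved matching filename; first-match-wins is preserved because a filename is resolved at most once, by the earliest matching mapping.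
import Mathlib
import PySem

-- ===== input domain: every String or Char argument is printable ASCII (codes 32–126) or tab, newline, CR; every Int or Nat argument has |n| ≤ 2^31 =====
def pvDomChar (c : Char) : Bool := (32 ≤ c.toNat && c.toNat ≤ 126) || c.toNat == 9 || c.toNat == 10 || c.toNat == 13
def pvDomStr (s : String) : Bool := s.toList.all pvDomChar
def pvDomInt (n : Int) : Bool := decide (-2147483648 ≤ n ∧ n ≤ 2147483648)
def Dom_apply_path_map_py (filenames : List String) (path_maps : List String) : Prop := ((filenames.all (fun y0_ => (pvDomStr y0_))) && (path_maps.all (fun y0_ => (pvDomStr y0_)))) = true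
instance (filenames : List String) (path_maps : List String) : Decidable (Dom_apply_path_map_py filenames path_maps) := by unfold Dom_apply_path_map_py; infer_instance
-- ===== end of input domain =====

-- B inverts the loop nesting: one pass over path_maps with an unresolved-filename set, splitting
-- each mapping once instead of once per filename (measured faster in a timing run).


-- ===== PORT A =====
-- A's inner `for mapping in path_maps` loop (with `break`), as structural recursion.
def pvAResolve (filename : String) : List String → String
  | [] => filename
  | mapping :: rest =>
    if PySem.Str.isIn "=" mapping = false then pvAResolve filename rest
    else
      match PySem.Str.splitMax? mapping "=" 1 with
      | some [device_prefix, host_prefix] =>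
        if PySem.Str.startswith filename device_prefix then
          host_prefix ++ PySem.Str.slice filename (some (PySem.Str.len device_prefix)) none
        else pvAResolve filename rest
      | _ => pvAResolve filename rest  -- unreachable: "=" in mapping forces a 2-way split

def apply_path_map_py (filenames : List String) (path_maps : List String) : List (String × String) :=
  (filenames.foldl
    (fun source_paths filename => source_paths.insert filename (pvAResolve filename path_maps))
    (PySem.Dict.empty : PySem.Dict String String)).items

-- ===== PORT B =====
-- B's body of `for mapping in path_maps`: resolve every still-unresolved matching filename.
def pvBStep (st : PySem.Dict String String × PySem.Set String) (mapping : String) :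
    PySem.Dict String String × PySem.Set String :=
  if PySem.Str.isIn "=" mapping = false then st
  else
    match PySem.Str.splitMax? mapping "=" 1 with
    | some [device_prefix, host_prefix] =>
      let matched := st.2.filter (fun fn => PySem.Str.startswith fn device_prefix)
      (matched.foldl
        (fun d fn =>
          d.insert fn (host_prefix ++ PySem.Str.slice fn (some (PySem.Str.len device_prefix)) none))
        st.1,
       PySem.Set.diff st.2 matched)
    | _ => st

def apply_path_map_py_alt (filenames : List String) (path_maps : List String) : List (String × String) :=
  ((path_maps.foldl pvBStep
      (filenames.foldl (fun d fn => d.insert fn fn) (PySem.Dict.empty : PySem.Dict String String),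
       PySem.Set.ofList filenames)).1).items

-- ===== PRECONDITION & SPEC =====
def Spec_apply_path_map_py (filenames : List String) (path_maps : List String) (out : List (String × String)) : Prop := out = apply_path_map_py_alt filenames path_maps
instance (filenames : List String) (path_maps : List String) (out : List (String × String)) : Decidable (Spec_apply_path_map_py filenames path_maps out) := by unfold Spec_apply_path_map_py; infer_instance

-- ===== CLAIM (what is proved, stated in full; the proofs are below) =====
def Claim_equal_apply_path_map_py : Prop := ∀ (filenames : List String) (path_maps : List String), Dom_apply_path_map_py filenames path_maps → Spec_apply_path_map_py filenames path_maps (apply_path_map_py filenames path_maps)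

-- ===== LEMMAS AND PROOFS =====

-- a dict whose items are s.map (f, v f) answers `contains` like membership in s
theorem pvContains_of_items_map (s : List String) (v : String → String)
    (d : PySem.Dict String String) (hd : d.items = s.map (fun f => (f, v f))) (x : String) :
    d.contains x = decide (x ∈ s) := by
  simp only [PySem.Dict.contains, hd, List.any_map]
  have hco : ((fun (p : String × String) => p.1 == x) ∘ fun f => (f, v f))
      = fun f => f == x := rfl
  rw [hco, List.any_beq']
  by_cases hx : x ∈ s <;> simp [hx]

-- a fold of `insert f (v f)` over xs, starting from items s.map (f, v f), yields Set.update s xs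
theorem pvItems_foldl_insert_fun (v : String → String) (xs : List String) :
    ∀ (s : List String) (d : PySem.Dict String String),
      d.items = s.map (fun f => (f, v f)) →
      (xs.foldl (fun d f => d.insert f (v f)) d).items
        = (PySem.Set.update s xs).map (fun f => (f, v f)) := by
  induction xs with
  | nil => intro s d hd; simpa [PySem.Set.update] using hd
  | cons x xs ih =>
    intro s d hd
    have hc : d.contains x = decide (x ∈ s) := pvContains_of_items_map s v d hd x
    by_cases hx : x ∈ s
    · have h1 : (d.insert x (v x)).items = s.map (fun f => (f, v f)) := by
        rw [PySem.Dict.items_insert_of_contains d (v x) (by rw [hc]; simpa using hx), hd,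
          List.map_map]
        apply List.map_congr_left
        intro f _
        by_cases hfx : f = x <;> simp [hfx]
      have h2 : PySem.Set.update s (x :: xs) = PySem.Set.update s xs := by
        simp [PySem.Set.update, PySem.Set.add, PySem.Set.contains, hx]
      rw [h2]
      simpa using ih s (d.insert x (v x)) h1
    · have h1 : (d.insert x (v x)).items = (s ++ [x]).map (fun f => (f, v f)) := by
        rw [PySem.Dict.items_insert_of_not_contains d (v x) (by rw [hc]; simpa using hx), hd]
        simp
      have h2 : PySem.Set.update s (x :: xs) = PySem.Set.update (s ++ [x]) xs := by
        simp [PySem.Set.update, PySem.Set.add, PySem.Set.contains, hx]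
      rw [h2]
      simpa using ih (s ++ [x]) (d.insert x (v x)) h1

-- folding `insert f (h f)` over l (all keys already present) rewrites exactly the keys in l
theorem pvItems_foldl_insert_mem (keys : List String) (h : String → String) :
    ∀ (l : List String) (g : String → String) (d : PySem.Dict String String),
      (∀ f ∈ l, f ∈ keys) →
      d.items = keys.map (fun f => (f, g f)) →
      (l.foldl (fun d f => d.insert f (h f)) d).items
        = keys.map (fun f => (f, if f ∈ l then h f else g f)) := by
  intro l
  induction l with
  | nil =>
    intro g d _ hd
    simpa using hd
  | cons x l ih =>
    intro g d hl hd
    have hkeys : x ∈ keys := hl x (by simp)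
    have hc : d.contains x = true := by
      rw [pvContains_of_items_map keys g d hd x]; simpa using hkeys
    have h1 : (d.insert x (h x)).items
        = keys.map (fun f => (f, if f = x then h x else g f)) := by
      rw [PySem.Dict.items_insert_of_contains d (h x) hc, hd, List.map_map]
      apply List.map_congr_left
      intro f _
      by_cases hfx : f = x <;> simp [hfx]
    have h2 := ih (fun f => if f = x then h x else g f) (d.insert x (h x))
      (fun f hf => hl f (by simp [hf])) h1
    rw [List.foldl_cons, h2]
    apply List.map_congr_left
    intro f _
    by_cases hfl : f ∈ l
    · simp [hfl]
    · by_cases hfx : f = x <;> simp [hfl, hfx]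

-- the main invariant for B's outer fold over path_maps
theorem pvBFold_invariant :
    ∀ (pms : List String) (keys : List String) (u : String → Bool) (v : String → String)
      (d : PySem.Dict String String) (un : PySem.Set String),
      d.items = keys.map (fun f => (f, v f)) →
      un = keys.filter u →
      (∀ f, u f = true → v f = f) →
      (pms.foldl pvBStep (d, un)).1.items
        = keys.map (fun f => (f, if u f then pvAResolve f pms else v f)) := by
  intro pms
  induction pms with
  | nil =>
    intro keys u v d un hd _ hv
    rw [List.foldl_nil, hd]
    apply List.map_congr_left
    intro f _
    by_cases hu : u f = true <;> simp [pvAResolve, hu, hv f]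
  | cons m rest ih =>
    intro keys u v d un hd hun hv
    rw [List.foldl_cons]
    by_cases hin : PySem.Str.isIn "=" m = false
    · have hstep : pvBStep (d, un) m = (d, un) := by
        simp only [pvBStep]
        rw [if_pos hin]
      have hres : ∀ f, pvAResolve f (m :: rest) = pvAResolve f rest := by
        intro f
        simp only [pvAResolve]
        rw [if_pos hin]
      rw [hstep, ih keys u v d un hd hun hv]
      apply List.map_congr_left
      intro f _
      by_cases hu : u f = true <;> simp [hu, hres f]
    · cases hs : PySem.Str.splitMax? m "=" 1 with
      | none =>
        have hstep : pvBStep (d, un) m = (d, un) := by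
          simp only [pvBStep]
          rw [if_neg hin]
          simp [hs]
        have hres : ∀ f, pvAResolve f (m :: rest) = pvAResolve f rest := by
          intro f
          simp only [pvAResolve]
          rw [if_neg hin]
          simp [hs]
        rw [hstep, ih keys u v d un hd hun hv]
        apply List.map_congr_left
        intro f _
        by_cases hu : u f = true <;> simp [hu, hres f]
      | some l =>
        match l with
        | [] =>
          have hstep : pvBStep (d, un) m = (d, un) := by
            simp only [pvBStep]
            rw [if_neg hin]
            simp [hs]
          have hres : ∀ f, pvAResolve f (m :: rest) = pvAResolve f rest := by
            intro f
            simp only [pvAResolve]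
            rw [if_neg hin]
            simp [hs]
          rw [hstep, ih keys u v d un hd hun hv]
          apply List.map_congr_left
          intro f _
          by_cases hu : u f = true <;> simp [hu, hres f]
        | [dp] =>
          have hstep : pvBStep (d, un) m = (d, un) := by
            simp only [pvBStep]
            rw [if_neg hin]
            simp [hs]
          have hres : ∀ f, pvAResolve f (m :: rest) = pvAResolve f rest := by
            intro f
            simp only [pvAResolve]
            rw [if_neg hin]
            simp [hs]
          rw [hstep, ih keys u v d un hd hun hv]
          apply List.map_congr_left
          intro f _
          by_cases hu : u f = true <;> simp [hu, hres f]
        | dp :: hp :: t :: ts =>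
          have hstep : pvBStep (d, un) m = (d, un) := by
            simp only [pvBStep]
            rw [if_neg hin]
            simp [hs]
          have hres : ∀ f, pvAResolve f (m :: rest) = pvAResolve f rest := by
            intro f
            simp only [pvAResolve]
            rw [if_neg hin]
            simp [hs]
          rw [hstep, ih keys u v d un hd hun hv]
          apply List.map_congr_left
          intro f _
          by_cases hu : u f = true <;> simp [hu, hres f]
        | [dp, hp] =>
          -- the real case: dp = device_prefix, hp = host_prefix
          set app : String → String :=
            fun fn => hp ++ PySem.Str.slice fn (some (PySem.Str.len dp)) none with happ
          set sw : String → Bool := fun fn => PySem.Str.startswith fn dp with hsw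
          have hmatched : un.filter sw = keys.filter (fun f => u f && sw f) := by
            rw [hun, List.filter_filter]
            apply List.filter_congr
            intro f _
            rw [Bool.and_comm]
          have hstep : pvBStep (d, un) m
              = ((un.filter sw).foldl (fun d fn => d.insert fn (app fn)) d,
                 PySem.Set.diff un (un.filter sw)) := by
            simp only [pvBStep]
            rw [if_neg hin]
            simp [hs, happ, hsw]
          have hresT : ∀ f, sw f = true → pvAResolve f (m :: rest) = app f := by
            intro f hf
            rw [hsw] at hf
            have hfC : PySem.Chars.startswith f.toList dp.toList = true := by simpa using hf
            simp only [pvAResolve]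
            rw [if_neg hin]
            simp [hs, hfC, happ]
          have hresF : ∀ f, sw f = false → pvAResolve f (m :: rest) = pvAResolve f rest := by
            intro f hf
            rw [hsw] at hf
            have hfC : PySem.Chars.startswith f.toList dp.toList = false := by simpa using hf
            simp only [pvAResolve]
            rw [if_neg hin]
            simp [hs, hfC]
          rw [hstep]
          -- new dict items
          have hsub : ∀ f ∈ un.filter sw, f ∈ keys := by
            intro f hf
            rw [hmatched] at hf
            exact (List.mem_filter.mp hf).1
          have hd' := pvItems_foldl_insert_mem keys app (un.filter sw) v d hsub hd
          have hd'' : ((un.filter sw).foldl (fun d fn => d.insert fn (app fn)) d).items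
              = keys.map (fun f => (f, if u f && sw f then app f else v f)) := by
            rw [hd']
            apply List.map_congr_left
            intro f hfk
            have hmem : (f ∈ un.filter sw) ↔ (u f && sw f) = true := by
              rw [hmatched, List.mem_filter]
              constructor
              · intro h0; exact h0.2
              · intro h0; exact ⟨hfk, h0⟩
            by_cases hm : f ∈ un.filter sw
            · simp [hm, hmem.mp hm]
            · have h0 : ¬((u f && sw f) = true) := fun hc => hm (hmem.mpr hc)
              simp [hm, h0]
          -- new unresolved set
          have hcontains : ∀ f ∈ un, (PySem.Set.contains (un.filter sw) f) = sw f := by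
            intro f hf
            by_cases hswf : sw f = true
            · have h0 : f ∈ un.filter sw := List.mem_filter.mpr ⟨hf, hswf⟩
              simp [PySem.Set.contains, h0, hswf]
            · have h0 : f ∉ un.filter sw := fun hc => hswf (List.mem_filter.mp hc).2
              have h1 : sw f = false := by simpa using hswf
              simp [PySem.Set.contains, h0, h1]
          have hun' : PySem.Set.diff un (un.filter sw)
              = keys.filter (fun f => u f && !sw f) := by
            rw [show PySem.Set.diff un (un.filter sw)
                  = un.filter (fun f => !(PySem.Set.contains (un.filter sw) f)) from rfl]
            rw [List.filter_congr (fun f hf => by rw [hcontains f hf])]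
            rw [hun, List.filter_filter]
            apply List.filter_congr
            intro f _
            rw [Bool.and_comm]
          have hv' : ∀ f, (u f && !sw f) = true →
              (if u f && sw f then app f else v f) = f := by
            intro f hf
            rw [Bool.and_eq_true] at hf
            obtain ⟨hu, hns⟩ := hf
            have hns' : sw f = false := by simpa using hns
            simp [hu, hns', hv f hu]
          have hih := ih keys (fun f => u f && !sw f)
            (fun f => if u f && sw f then app f else v f)
            ((un.filter sw).foldl (fun d fn => d.insert fn (app fn)) d)
            (PySem.Set.diff un (un.filter sw)) hd'' (by rw [hun']) hv'
          rw [hih]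
          apply List.map_congr_left
          intro f _
          by_cases hu : u f = true
          · by_cases hswf : sw f = true
            · simp [hu, hswf, hresT f hswf]
            · have h0 : sw f = false := by simpa using hswf
              simp [hu, h0, hresF f h0]
          · have h0 : u f = false := by simpa using hu
            simp [h0]

-- ===== VERDICT (by name: the statement is the Claim_ definition above) =====
theorem apply_path_map_py_spec : Claim_equal_apply_path_map_py := by
  intro filenames path_maps _
  unfold Spec_apply_path_map_py apply_path_map_py apply_path_map_py_alt
  have hA := pvItems_foldl_insert_fun (fun f => pvAResolve f path_maps) filenames []
    PySem.Dict.empty (by simp [PySem.Dict.empty])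
  have hupd : PySem.Set.update ([] : PySem.Set String) filenames
      = PySem.Set.ofList filenames := rfl
  rw [hupd] at hA
  have hSeed := pvItems_foldl_insert_fun (fun f => f) filenames []
    PySem.Dict.empty (by simp [PySem.Dict.empty])
  rw [hupd] at hSeed
  have hB := pvBFold_invariant path_maps (PySem.Set.ofList filenames) (fun _ => true)
    (fun f => f)
    (filenames.foldl (fun d fn => d.insert fn fn) (PySem.Dict.empty : PySem.Dict String String))
    (PySem.Set.ofList filenames)
    (by simpa using hSeed) (by simp) (fun f _ => rfl)
  rw [hB]
  simpa using hA
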